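-- pv_equiv track=rewrite | github.com/olivierC80/Semantic | rendus/2025/generateHtml.py | paginate_cells
-- ===== SOURCE A (Python) =====
-- def paginate_cells(code_cells, max_lines=45, n_cols=3):
--     pages = []
--     page = {'cols': [[] for _ in range(n_cols)]}
--     col_lines = [0] * n_cols
--     col_idx = 0
--
--     for cell in code_cells:
--         n = len(cell)
--         if col_lines[col_idx] + n > max_lines:
--             col_idx += 1
--             if col_idx >= n_cols:
--                 pages.append(page)
--                 page = {'cols': [[] for _ in range(n_cols)]}
--                 col_lines = [0] * n_cols
--                 col_idx = 0
--         page['cols'][col_idx].append(cell)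
--         col_lines[col_idx] += n
--
--     if any(page['cols']):
--         pages.append(page)
--     return pages
-- ===== SOURCE B (Python) =====
-- def paginate_cells(code_cells, max_lines=45, n_cols=3):
--     # Pass 1: build a flat list of columns; finalize the current column on every
--     # overflow (even if it is still empty, which happens for oversized cells).
--     cols = []
--     cur, cur_lines = [], 0
--     for cell in code_cells:
--         if cur_lines + len(cell) > max_lines:
--             cols.append(cur)
--             cur, cur_lines = [], 0
--         cur.append(cell)
--         cur_lines += len(cell)
--     cols.append(cur)
--     # Pass 2: group columns into pages of n_cols, padding the last page.
--     pages = []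
--     for i in range(0, len(cols), n_cols):
--         chunk = cols[i:i + n_cols]
--         chunk += [[] for _ in range(n_cols - len(chunk))]
--         pages.append({'cols': chunk})
--     if pages and not any(pages[-1]['cols']):
--         pages.pop()
--     return pages
-- ===== Notes on version B (the rewrite author's own statement) =====
-- stated objective: alternative
-- what changed: Replaces A's single loop over a mutable page/column-index state machine by two independent passes: first flatten the cells into a list of columns by running line count (finalizing on every overflow), then group that flat list into pages of n_cols with padding and drop a trailing all-empty page.
-- outside the precondition, e.g. on paginate_cells([], 45, 0): A returns [], B raises ValueError
import Mathlib
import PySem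

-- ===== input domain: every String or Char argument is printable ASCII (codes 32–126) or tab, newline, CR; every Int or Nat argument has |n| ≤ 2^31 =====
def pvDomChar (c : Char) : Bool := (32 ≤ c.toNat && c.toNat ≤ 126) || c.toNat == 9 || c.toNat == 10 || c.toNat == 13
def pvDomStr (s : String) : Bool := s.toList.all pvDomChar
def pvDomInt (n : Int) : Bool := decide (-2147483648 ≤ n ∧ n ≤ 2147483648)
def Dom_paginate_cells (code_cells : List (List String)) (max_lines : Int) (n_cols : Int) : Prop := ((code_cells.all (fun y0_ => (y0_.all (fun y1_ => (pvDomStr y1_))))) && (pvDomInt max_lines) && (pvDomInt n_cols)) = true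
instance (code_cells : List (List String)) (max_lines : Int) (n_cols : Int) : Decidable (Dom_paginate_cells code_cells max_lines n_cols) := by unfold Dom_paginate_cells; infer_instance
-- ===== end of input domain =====

-- B replaces A's one-loop page/column state machine by two passes (flatten cells
-- into columns, then group columns into pages); alternative decomposition, same cost.

-- ===== PORT A =====
-- One loop step of A. `col_lines[col_idx]` is ported as `getD`: under
-- Pre_ (1 ≤ n_cols) the index is always in range, exactly as in Python.
def pvStepA (max_lines n_cols : Int)
    (st : List (List (String × List (List (List String)))) ×
          List (List (List String)) × List Int × Nat)
    (cell : List String) :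
    List (List (String × List (List (List String)))) ×
          List (List (List String)) × List Int × Nat :=
  let (pages, cols, lines, idx) := st
  let n : Int := (cell.length : Int)
  let (pages, cols, lines, idx) :=
    if lines.getD idx 0 + n > max_lines then
      let idx := idx + 1
      if n_cols ≤ (idx : Int) then
        (pages ++ [[("cols", cols)]],
         List.replicate n_cols.toNat ([] : List (List String)),
         List.replicate n_cols.toNat (0 : Int), 0)
      else (pages, cols, lines, idx)
    else (pages, cols, lines, idx)
  (pages, cols.set idx (cols.getD idx [] ++ [cell]),
   lines.set idx (lines.getD idx 0 + n), idx)

def paginate_cells (code_cells : List (List String)) (max_lines : Int) (n_cols : Int) :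
    List (List (String × List (List (List String)))) :=
  let st := code_cells.foldl (pvStepA max_lines n_cols)
    ([], List.replicate n_cols.toNat ([] : List (List String)),
     List.replicate n_cols.toNat (0 : Int), 0)
  if st.2.1.any (fun c => !c.isEmpty) then st.1 ++ [[("cols", st.2.1)]] else st.1

-- ===== PORT B =====
-- Pass 1 step: finalize the current column on overflow, then add the cell.
def pvStepB (max_lines : Int)
    (st : List (List (List String)) × List (List String) × Int)
    (cell : List String) :
    List (List (List String)) × List (List String) × Int :=
  let (cols, cur, cur_lines) := st
  let n : Int := (cell.length : Int)
  if cur_lines + n > max_lines then (cols ++ [cur], [cell], n)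
  else (cols, cur ++ [cell], cur_lines + n)

-- Pass 2: Source B's `for i in range(0, len(cols), n_cols)` slice-and-pad loop,
-- as the corresponding take/drop recursion.
def pvPagesOf (n_cols : Int) (cols : List (List (List String))) :
    List (List (String × List (List (List String)))) :=
  if h : cols = [] ∨ n_cols.toNat = 0 then []
  else
    [("cols", cols.take n_cols.toNat ++
        List.replicate (n_cols - ((cols.take n_cols.toNat).length : Int)).toNat
          ([] : List (List String)))] ::
      pvPagesOf n_cols (cols.drop n_cols.toNat)
termination_by cols.length
decreasing_by
  rcases not_or.mp h with ⟨h1, h2⟩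
  have : cols.length ≠ 0 := fun hl => h1 (List.eq_nil_of_length_eq_zero hl)
  simp [List.length_drop]; omega

def paginate_cells_alt (code_cells : List (List String)) (max_lines : Int) (n_cols : Int) :
    List (List (String × List (List (List String)))) :=
  let st := code_cells.foldl (pvStepB max_lines) ([], [], 0)
  let cols := st.1 ++ [st.2.1]
  let pages := pvPagesOf n_cols cols
  match pages.getLast? with
  | some pg =>
      if pg.all (fun kv => kv.2.all (fun c => c.isEmpty)) then pages.dropLast else pages
  | none => pages

-- ===== PRECONDITION & SPEC =====
-- Pre_ excludes n_cols < 1: there Python A raises IndexError on any nonempty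
-- code_cells (it returns [] only vacuously on empty input), and B's own chunking
-- raises ValueError for n_cols = 0; these degenerate inputs are outside the
-- function's natural domain.
def Pre_paginate_cells (code_cells : List (List String)) (max_lines : Int) (n_cols : Int) : Prop :=
  1 ≤ n_cols
instance (code_cells : List (List String)) (max_lines : Int) (n_cols : Int) : Decidable (Pre_paginate_cells code_cells max_lines n_cols) := by unfold Pre_paginate_cells; infer_instance

def pvWitness_paginate_cells : List (List String) × Int × Int := ([["a"], ["b", "c"], ["d"]], 2, 2)

def Spec_paginate_cells (code_cells : List (List String)) (max_lines : Int) (n_cols : Int) (out : List (List (String × List (List (List String))))) : Prop := out = paginate_cells_alt code_cells max_lines n_cols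
instance (code_cells : List (List String)) (max_lines : Int) (n_cols : Int) (out : List (List (String × List (List (List String))))) : Decidable (Spec_paginate_cells code_cells max_lines n_cols out) := by unfold Spec_paginate_cells; infer_instance

-- ===== CLAIM (what is proved, stated in full; the proofs are below) =====
def Claim_equal_paginate_cells : Prop := ∀ (code_cells : List (List String)) (max_lines : Int) (n_cols : Int), Dom_paginate_cells code_cells max_lines n_cols → Pre_paginate_cells code_cells max_lines n_cols → Spec_paginate_cells code_cells max_lines n_cols (paginate_cells code_cells max_lines n_cols)

-- ===== LEMMAS AND PROOFS =====

-- Coupling invariant between A's loop state and B's pass-1 state.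
def pvRel (n_cols : Int)
    (sa : List (List (String × List (List (List String)))) ×
          List (List (List String)) × List Int × Nat)
    (sb : List (List (List String)) × List (List String) × Int) : Prop :=
  match sa, sb with
  | (pages, cols, lines, idx), (bcols, cur, cl) =>
    let n := n_cols.toNat
    idx < n ∧
    lines.length = n ∧
    bcols.length = n * pages.length + idx ∧
    (∀ rest : List (List (List String)), rest ≠ [] →
       pvPagesOf n_cols (bcols.take (n * pages.length) ++ rest) =
         pages ++ pvPagesOf n_cols rest) ∧
    cols = bcols.drop (n * pages.length) ++ cur :: List.replicate (n - (idx + 1)) [] ∧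
    lines.getD idx 0 = cl ∧
    (∀ i : Nat, idx < i → lines.getD i 0 = 0)

lemma pvGetD_mid {α : Type} (D : List α) (x : α) (R : List α) (d : α) :
    (D ++ x :: R).getD D.length d = x := by
  induction D with
  | nil => rfl
  | cons a D ih => simpa using ih

lemma pvSet_mid {α : Type} (D : List α) (x y : α) (R : List α) :
    (D ++ x :: R).set D.length y = D ++ y :: R := by
  induction D with
  | nil => rfl
  | cons a D ih => simpa using ih

lemma pvGetD_set_self {α : Type} (l : List α) (i : Nat) (v d : α) (h : i < l.length) :
    (l.set i v).getD i d = v := by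
  simp [List.getD, List.getElem?_set_self', h]

lemma pvGetD_set_ne {α : Type} (l : List α) (i j : Nat) (v d : α) (h : i ≠ j) :
    (l.set i v).getD j d = l.getD j d := by
  simp [List.getD, List.getElem?_set_ne h]

lemma pvGetD_replicate {α : Type} (n i : Nat) (d : α) :
    (List.replicate n d).getD i d = d := by
  simp [List.getD, List.getElem?_replicate]
  split <;> rfl

lemma pvPagesOf_nil (n_cols : Int) : pvPagesOf n_cols [] = [] := by
  rw [pvPagesOf]; simp

-- one unfolding of pvPagesOf on a block of exactly n_cols columns
lemma pvPagesOf_block (n_cols : Int) (hn : 1 ≤ n_cols)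
    (C rest : List (List (List String))) (hC : C.length = n_cols.toNat) :
    pvPagesOf n_cols (C ++ rest) =
      [("cols", C)] :: pvPagesOf n_cols rest := by
  have hn0 : n_cols.toNat ≠ 0 := by omega
  have hCne : C ≠ [] := by
    intro h; rw [h] at hC; simp at hC; omega
  rw [pvPagesOf]
  rw [dif_neg (by simp [hCne, hn0])]
  rw [List.take_left' hC, List.drop_left' hC]
  have : (n_cols - (C.length : Int)).toNat = 0 := by omega
  simp [hC, this]

-- one unfolding of pvPagesOf on a short (≤ n_cols) nonempty list
lemma pvPagesOf_short (n_cols : Int) (hn : 1 ≤ n_cols)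
    (C : List (List (List String))) (hne : C ≠ []) (hC : C.length ≤ n_cols.toNat) :
    pvPagesOf n_cols C =
      [[("cols", C ++ List.replicate (n_cols.toNat - C.length) [])]] := by
  have hn0 : n_cols.toNat ≠ 0 := by omega
  rw [pvPagesOf]
  rw [dif_neg (by simp [hne, hn0])]
  rw [List.take_of_length_le hC, List.drop_eq_nil_of_le hC, pvPagesOf_nil]
  have : (n_cols - (C.length : Int)).toNat = n_cols.toNat - C.length := by omega
  simp [this]

lemma pvRel_step (max_lines n_cols : Int) (hn : 1 ≤ n_cols) (sa : _) (sb : _)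
    (cell : List String) (h : pvRel n_cols sa sb) :
    pvRel n_cols (pvStepA max_lines n_cols sa cell) (pvStepB max_lines sb cell) := by
  obtain ⟨pages, cols, lines, idx⟩ := sa
  obtain ⟨bcols, cur, cl⟩ := sb
  obtain ⟨h1, h2, h3, h4, h5, h6, h7⟩ := h
  set n := n_cols.toNat with hnn
  have hnc : (n : Int) = n_cols := Int.toNat_of_nonneg (by omega)
  have hDlen : (bcols.drop (n * pages.length)).length = idx := by
    simp [List.length_drop]; omega
  simp only [pvStepA, pvStepB]
  rw [h6]
  by_cases hov : cl + (cell.length : Int) > max_lines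
  · rw [if_pos hov, if_pos hov]
    by_cases hroll : n_cols ≤ ((idx + 1 : Nat) : Int)
    · -- rollover: idx was the last column
      rw [if_pos hroll]
      have hidx : idx + 1 = n := by omega
      simp only [pvRel, ← hnn, List.length_append, List.length_cons, List.length_nil]
      have hmul : n * (pages.length + 1) = n * pages.length + n := by ring
      have hblen : bcols.length = n * pages.length + idx := h3
      refine ⟨by omega, by simp, by simp; omega, ?_, ?_, ?_, ?_⟩
      · -- pages invariant
        intro rest hrest
        have htk : (bcols ++ [cur]).take (n * 1 + n * pages.length) = bcols ++ [cur] := by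
          apply List.take_of_length_le; simp; omega
        rw [Nat.add_comm pages.length 1, Nat.mul_add, htk]
        have hsplit : bcols ++ [cur] =
            bcols.take (n * pages.length) ++ (bcols.drop (n * pages.length) ++ [cur]) := by
          rw [← List.append_assoc, List.take_append_drop]
        rw [hsplit, List.append_assoc, h4 _ (by simp)]
        have hblock : (bcols.drop (n * pages.length) ++ [cur]).length = n_cols.toNat := by
          simp [hDlen, ← hnn]; omega
        rw [pvPagesOf_block n_cols hn _ rest hblock]
        have hcols : cols = bcols.drop (n * pages.length) ++ [cur] := by
          rw [h5]
          have : n - (idx + 1) = 0 := by omega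
          simp [this]
        simp [hcols]
      · -- cols invariant
        have hdropall : ((bcols ++ [cur]).drop (n * 1 + n * pages.length)) = [] := by
          apply List.drop_eq_nil_of_le; simp; omega
        rw [Nat.add_comm pages.length 1, Nat.mul_add, hdropall]
        rw [show n = (n - 1) + 1 by omega, List.replicate_succ]
        simp
      · -- lines getD at 0
        rw [show n = (n - 1) + 1 by omega, List.replicate_succ]
        simp [List.getD]
      · intro i hi
        rw [pvGetD_set_ne _ _ _ _ _ (by omega), pvGetD_replicate]
    · -- advance within the page
      rw [if_neg hroll]
      simp only [pvRel, ← hnn]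
      have hidx1 : idx + 1 < n := by omega
      have hcolsgd : cols.getD (idx + 1) [] = [] := by
        rw [h5]
        have : n - (idx + 1) = 1 + (n - (idx + 2)) := by omega
        rw [this, List.replicate_add]
        simp only [List.replicate_one]
        have := pvGetD_mid (bcols.drop (n * pages.length) ++ [cur])
          ([] : List (List String)) (List.replicate (n - (idx+2)) []) []
        simpa [hDlen, List.append_assoc] using this
      refine ⟨hidx1, by simp [h2], by simp; omega, ?_, ?_, ?_, ?_⟩
      · intro rest hrest
        have htk : (bcols ++ [cur]).take (n * pages.length) = bcols.take (n * pages.length) := by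
          apply List.take_append_of_le_length; omega
        rw [htk]; exact h4 rest hrest
      · rw [hcolsgd, h5]
        have : n - (idx + 1) = 1 + (n - (idx + 2)) := by omega
        rw [this, List.replicate_add]
        simp only [List.replicate_one, List.nil_append]
        have hset := pvSet_mid (bcols.drop (n * pages.length) ++ [cur])
          ([] : List (List String)) ([cell] : List (List String))
          (List.replicate (n - (idx + 2)) [])
        have hlen : (bcols.drop (n * pages.length) ++ [cur]).length = idx + 1 := by
          simp [hDlen]
        rw [hlen] at hset
        have hform : bcols.drop (n * pages.length) ++ cur :: ([[]] ++ List.replicate (n - (idx + 2)) ([] : List (List String))) =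
            (bcols.drop (n * pages.length) ++ [cur]) ++ ([] : List (List String)) :: List.replicate (n - (idx + 2)) [] := by
          simp
        rw [hform, hset]
        have hdrop : (bcols ++ [cur]).drop (n * pages.length) =
            bcols.drop (n * pages.length) ++ [cur] := by
          apply List.drop_append_of_le_length; omega
        rw [hdrop]
      · rw [pvGetD_set_self _ _ _ _ (by omega)]
        rw [h7 (idx + 1) (by omega)]
        omega
      · intro i hi
        rw [pvGetD_set_ne _ _ _ _ _ (by omega), h7 i (by omega)]
  · rw [if_neg hov, if_neg hov]
    simp only [pvRel, ← hnn]
    have hcolsgd : cols.getD idx [] = cur := by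
      rw [h5, ← hDlen]; exact pvGetD_mid _ _ _ _
    refine ⟨h1, by simp [h2], by simp [h3], ?_, ?_, ?_, ?_⟩
    · exact h4
    · rw [hcolsgd, h5, ← hDlen]
      exact pvSet_mid _ _ _ _
    · rw [pvGetD_set_self]
      · rw [h6]
      · omega
    · intro i hi
      rw [pvGetD_set_ne _ _ _ _ _ (by omega), h7 i hi]

lemma pvRel_fold (max_lines n_cols : Int) (hn : 1 ≤ n_cols)
    (cells : List (List String)) :
    ∀ sa sb, pvRel n_cols sa sb →
      pvRel n_cols (cells.foldl (pvStepA max_lines n_cols) sa)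
        (cells.foldl (pvStepB max_lines) sb) := by
  induction cells with
  | nil => intro sa sb h; exact h
  | cons c cs ih =>
      intro sa sb h
      exact ih _ _ (pvRel_step max_lines n_cols hn sa sb c h)

lemma pvRel_init (max_lines n_cols : Int) (hn : 1 ≤ n_cols) :
    pvRel n_cols
      ([], List.replicate n_cols.toNat ([] : List (List String)),
       List.replicate n_cols.toNat (0 : Int), 0)
      ([], [], 0) := by
  have hn0 : 0 < n_cols.toNat := by omega
  refine ⟨hn0, by simp, by simp, ?_, ?_, ?_, ?_⟩
  · intro rest hrest; simp
  · have : n_cols.toNat = 1 + (n_cols.toNat - 1) := by omega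
    rw [this, List.replicate_add]
    simp
  · rw [pvGetD_replicate]
  · intro i hi; rw [pvGetD_replicate]

-- ===== VERDICT (by name: the statement is the Claim_ definition above) =====
theorem paginate_cells_spec : Claim_equal_paginate_cells := by
  intro code_cells max_lines n_cols _hdom hpre
  have hn : 1 ≤ n_cols := hpre
  unfold Spec_paginate_cells paginate_cells paginate_cells_alt
  have hrel := pvRel_fold max_lines n_cols hn code_cells _ _ (pvRel_init max_lines n_cols hn)
  set stA := code_cells.foldl (pvStepA max_lines n_cols)
    ([], List.replicate n_cols.toNat ([] : List (List String)),
     List.replicate n_cols.toNat (0 : Int), 0) with hstA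
  set stB := code_cells.foldl (pvStepB max_lines) ([], [], 0) with hstB
  obtain ⟨pages, cols, lines, idx⟩ := stA
  obtain ⟨bcols, cur, cl⟩ := stB
  obtain ⟨h1, h2, h3, h4, h5, h6, h7⟩ := hrel
  set n := n_cols.toNat with hnn
  have hDlen : (bcols.drop (n * pages.length)).length = idx := by
    simp [List.length_drop]; omega
  -- B's flat column list splits as full pages ++ a final short block
  have hsplit : bcols ++ [cur] =
      bcols.take (n * pages.length) ++ (bcols.drop (n * pages.length) ++ [cur]) := by
    rw [← List.append_assoc, List.take_append_drop]
  have hpagesB : pvPagesOf n_cols (bcols ++ [cur]) =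
      pages ++ [[("cols", cols)]] := by
    rw [hsplit, h4 _ (by simp)]
    have hlen : (bcols.drop (n * pages.length) ++ [cur]).length = idx + 1 := by
      simp [hDlen]
    rw [pvPagesOf_short n_cols hn _ (by simp) (by rw [hlen]; omega), hlen]
    have hcols : (bcols.drop (n * pages.length) ++ [cur]) ++
        List.replicate (n_cols.toNat - (idx + 1)) ([] : List (List String)) = cols := by
      rw [h5, ← hnn]; simp
    rw [hcols]
  simp only [hpagesB]
  rw [List.getLast?_concat, List.dropLast_concat]
  simp only [List.all_cons, List.all_nil, Bool.and_true]
  have hany : cols.any (fun c => !c.isEmpty) = !(cols.all (fun c => c.isEmpty)) := by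
    simp [List.any_eq_not_all_not]
  rw [hany]
  cases hall : cols.all (fun c => c.isEmpty) <;> simp
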